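-- pv_equiv track=rewrite | github.com/SherzodOtajonov/cp-stuff | binarysearch.com/2021/weekly_contests/week_43/problem_1.py | solve
-- ===== SOURCE A (Python) =====
-- def solve(contacts):
--     if not contacts: return 0
--     r=1
--     f=1
--     s = set(contacts[0])
--     for i in range(1, len(contacts)):
--         for j in contacts[i]:
--             if j in s:
--                 f=0
--             s.add(j)
--         if f:
--             r+=1
--         else: f=1
--     return r
-- ===== SOURCE B (Python) =====
-- def solve(contacts):
--     if not contacts:
--         return 0
--     # Pass 1: index of the group where each element first appears.
--     first = {}
--     for i, group in enumerate(contacts):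
--         for j in group:
--             if j not in first:
--                 first[j] = i
--     # Pass 2: a group (after the first) counts iff it has no internal
--     # duplicates and every element first appears in this very group.
--     r = 1
--     for i, group in enumerate(contacts):
--         if i > 0 and len(set(group)) == len(group) and all(first[j] == i for j in group):
--             r += 1
--     return r
-- ===== Notes on version B (the rewrite author's own statement) =====
-- stated objective: alternative
-- what changed: Replaces A's single pass with a running seen-set and per-element flag by two staged passes: pass 1 builds a dict mapping each element to the index of the group where it first appears, pass 2 counts the groups whose elements are pairwise distinct and all first occur in that very group.
import Mathlib
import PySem

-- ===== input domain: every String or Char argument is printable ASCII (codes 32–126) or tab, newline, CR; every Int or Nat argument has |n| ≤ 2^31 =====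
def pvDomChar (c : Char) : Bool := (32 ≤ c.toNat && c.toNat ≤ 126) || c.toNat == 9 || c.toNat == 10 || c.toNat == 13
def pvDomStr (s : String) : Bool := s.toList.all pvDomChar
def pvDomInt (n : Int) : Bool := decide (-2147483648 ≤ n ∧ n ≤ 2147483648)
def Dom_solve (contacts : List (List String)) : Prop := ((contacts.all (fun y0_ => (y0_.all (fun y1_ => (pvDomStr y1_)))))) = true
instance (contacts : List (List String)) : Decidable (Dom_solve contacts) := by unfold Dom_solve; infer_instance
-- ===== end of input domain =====

-- B replaces A's single pass with a running flag/seen-set by two staged passes: a first pass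
-- builds a first-occurrence-group index for every element, a second pass counts the groups
-- whose elements are distinct and all first occur there. Objective: alternative decomposition.


-- ===== PORT A =====
-- r, f, s as in the Python; the inner loop sets f to 0 on any already-seen element.
def solve (contacts : List (List String)) : Int :=
  match contacts with
  | [] => 0
  | c0 :: rest =>
    (rest.foldl
      (fun (st : Int × Int × PySem.Set String) g =>
        let inner := g.foldl
          (fun (p : Int × PySem.Set String) j =>
            (if PySem.Set.contains p.2 j then 0 else p.1, PySem.Set.add p.2 j))
          (st.2.1, st.2.2)
        if inner.1 ≠ 0 then (st.1 + 1, 1, inner.2) else (st.1, 1, inner.2))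
      (1, 1, PySem.Set.ofList c0)).1

-- ===== PORT B =====
-- Pass 1 of Source B: dict 'first' mapping each element to the index of the group where it
-- first appears ('if j not in first: first[j] = i').
def firstMap (contacts : List (List String)) : PySem.Dict String Int :=
  (PySem.List.enumerate contacts 0).foldl
    (fun d p => p.2.foldl (fun d j => if d.contains j then d else d.insert j p.1) d)
    PySem.Dict.empty

-- Pass 2 of Source B. 'first[j] == i' is ported as 'first.get? j == some i': the key j is always
-- present (j occurs in group i), so Python's lookup never raises and the port is exact.
def solve_alt (contacts : List (List String)) : Int :=
  match contacts with
  | [] => 0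
  | _ :: _ =>
    let first := firstMap contacts
    (PySem.List.enumerate contacts 0).foldl
      (fun r p =>
        if 0 < p.1 ∧ PySem.Set.len (PySem.Set.ofList p.2) = (p.2.length : Int) ∧
            p.2.all (fun j => first.get? j == some p.1) = true
        then r + 1 else r) 1

-- ===== PRECONDITION & SPEC =====
def Spec_solve (contacts : List (List String)) (out : Int) : Prop := out = solve_alt contacts
instance (contacts : List (List String)) (out : Int) : Decidable (Spec_solve contacts out) := by unfold Spec_solve; infer_instance

-- ===== CLAIM (what is proved, stated in full; the proofs are below) =====
def Claim_equal_solve : Prop := ∀ (contacts : List (List String)), Dom_solve contacts → Spec_solve contacts (solve contacts)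

-- ===== LEMMAS AND PROOFS =====

-- Reference form of A's loop: running set, counting groups that grow it by their full length.
def aLoop (s : PySem.Set String) (r : Int) : List (List String) → Int
  | [] => r
  | g :: gs =>
    aLoop (PySem.Set.update s g)
      (if (PySem.Set.update s g).length = s.length + g.length then r + 1 else r) gs

theorem pv_length_update_le (s : PySem.Set String) (g : List String) :
    (PySem.Set.update s g).length ≤ s.length + g.length := by
  induction g generalizing s with
  | nil => simp [PySem.Set.update_nil]
  | cons x g ih =>
    rw [PySem.Set.update_cons]
    have h := ih (PySem.Set.add s x)
    have : (PySem.Set.add s x).length ≤ s.length + 1 := by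
      rw [PySem.Set.add_eq_ite]; split <;> simp
    simp only [List.length_cons]; omega

theorem pv_inner_snd (g : List String) (f : Int) (s : PySem.Set String) :
    (g.foldl (fun (p : Int × PySem.Set String) j =>
        (if PySem.Set.contains p.2 j then 0 else p.1, PySem.Set.add p.2 j)) (f, s)).2
      = PySem.Set.update s g := by
  induction g generalizing f s with
  | nil => simp [PySem.Set.update_nil]
  | cons x g ih => rw [PySem.Set.update_cons]; simpa using ih _ (PySem.Set.add s x)

theorem pv_inner_fst (g : List String) (f : Int) (s : PySem.Set String) :
    (g.foldl (fun (p : Int × PySem.Set String) j =>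
        (if PySem.Set.contains p.2 j then 0 else p.1, PySem.Set.add p.2 j)) (f, s)).1
      = if (PySem.Set.update s g).length = s.length + g.length then f else 0 := by
  induction g generalizing f s with
  | nil => simp [PySem.Set.update_nil]
  | cons x g ih =>
    simp only [List.foldl_cons, PySem.Set.update_cons]
    by_cases hx : x ∈ s
    · have hc : PySem.Set.contains s x = true := by
        simp [PySem.Set.contains_eq_listContains, hx]
      simp only [hc, if_true]
      rw [ih 0 (PySem.Set.add s x)]
      have hadd : PySem.Set.add s x = s := PySem.Set.add_of_mem hx
      have hle := pv_length_update_le s g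
      simp only [hadd, List.length_cons]
      split <;> split <;> first | rfl | (exfalso; omega)
    · have hc : PySem.Set.contains s x = false := by
        simp [PySem.Set.contains_eq_listContains, hx]
      simp only [hc, Bool.false_eq_true, if_false]
      rw [ih f (PySem.Set.add s x)]
      have hlen : (PySem.Set.add s x).length = s.length + 1 := by
        rw [PySem.Set.add_of_not_mem hx]; simp
      simp only [hlen, List.length_cons]
      split <;> split <;> first | rfl | omega

-- A's fold equals the reference loop.
theorem pv_aLoop (gs : List (List String)) : ∀ (r : Int) (s : PySem.Set String),
    (gs.foldl
      (fun (st : Int × Int × PySem.Set String) g =>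
        let inner := g.foldl
          (fun (p : Int × PySem.Set String) j =>
            (if PySem.Set.contains p.2 j then 0 else p.1, PySem.Set.add p.2 j))
          (st.2.1, st.2.2)
        if inner.1 ≠ 0 then (st.1 + 1, 1, inner.2) else (st.1, 1, inner.2))
      (r, 1, s)).1 = aLoop s r gs := by
  induction gs with
  | nil => intro r s; rfl
  | cons g gs ih =>
    intro r s
    simp only [List.foldl_cons, aLoop]
    have h1 := pv_inner_fst g 1 s
    have h2 := pv_inner_snd g 1 s
    by_cases hc : (g.foldl (fun (p : Int × PySem.Set String) j =>
        (if PySem.Set.contains p.2 j then 0 else p.1, PySem.Set.add p.2 j)) (1, s)).1 ≠ 0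
    · have hfresh : (PySem.Set.update s g).length = s.length + g.length := by
        by_contra hq
        rw [h1, if_neg hq] at hc
        exact hc rfl
      rw [if_pos hc, if_pos hfresh]
      simp only [h2]; exact ih (r + 1) _
    · have hfresh : ¬ (PySem.Set.update s g).length = s.length + g.length := by
        intro hq
        rw [h1, if_pos hq] at hc
        simp at hc
      rw [if_neg hc, if_neg hfresh]
      simp only [h2]; exact ih r _

-- A's per-group flag condition, characterised: the set grows by |g| iff g has no internal
-- duplicates and is disjoint from s.
theorem pv_fresh_iff (g : List String) (s : PySem.Set String) :
    (PySem.Set.update s g).length = s.length + g.length ↔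
      (g.Nodup ∧ ∀ j ∈ g, j ∉ s) := by
  induction g generalizing s with
  | nil => simp [PySem.Set.update_nil]
  | cons x g ih =>
    rw [PySem.Set.update_cons]
    by_cases hx : x ∈ s
    · rw [PySem.Set.add_of_mem hx]
      have hle := pv_length_update_le s g
      constructor
      · intro h; exfalso; simp only [List.length_cons] at h; omega
      · rintro ⟨-, hall⟩; exact absurd hx (hall x (by simp))
    · rw [PySem.Set.add_of_not_mem hx]
      have hstep := ih (s ++ [x])
      simp only [List.length_append, List.length_singleton] at hstep
      rw [List.length_cons]
      constructor
      · intro h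
        obtain ⟨hnd, hall⟩ := hstep.mp (by omega)
        refine ⟨List.nodup_cons.mpr ⟨fun hxg => by simpa using hall x hxg, hnd⟩, ?_⟩
        intro j hj
        rcases List.mem_cons.mp hj with rfl | hj
        · exact hx
        · intro hjs; exact (hall j hj) (by simp [hjs])
      · rintro ⟨hnd, hall⟩
        obtain ⟨hxg, hnd'⟩ := List.nodup_cons.mp hnd
        have : (PySem.Set.update (s ++ [x]) g).length = s.length + 1 + g.length := by
          apply hstep.mpr
          refine ⟨hnd', fun j hj => ?_⟩
          simp only [List.mem_append, List.mem_singleton]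
          rintro (hjs | rfl)
          · exact hall j (by simp [hj]) hjs
          · exact hxg hj
        omega

-- len(set(g)) == len(g) iff g has no duplicates.
theorem pv_ofList_len_iff (g : List String) :
    PySem.Set.len (PySem.Set.ofList g) = (g.length : Int) ↔ g.Nodup := by
  have hof : PySem.Set.ofList g = PySem.Set.update PySem.Set.empty g := rfl
  rw [PySem.Set.len_eq, hof, Nat.cast_inj]
  simpa [PySem.Set.empty] using pv_fresh_iff g PySem.Set.empty

-- Pass 1, inner loop: effect on one key.
theorem pv_dinner (g : List String) (i : Int) (d : PySem.Dict String Int) (j : String) :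
    (g.foldl (fun d j' => if d.contains j' then d else d.insert j' i) d).get? j
      = if d.contains j then d.get? j else if j ∈ g then some i else none := by
  induction g generalizing d with
  | nil =>
    simp only [List.foldl_nil, List.not_mem_nil, if_false]
    split
    · rfl
    · rename_i h
      exact (PySem.Dict.get?_eq_none_iff_contains d j).mpr (by simpa using h)
  | cons x g ih =>
    simp only [List.foldl_cons]
    by_cases hcx : d.contains x = true
    · rw [if_pos hcx, ih d]
      by_cases hcj : d.contains j = true
      · simp [hcj]
      · simp only [hcj, Bool.false_eq_true, if_false]
        by_cases hjx : j = x
        · subst hjx; exact absurd hcx (by simp [hcj])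
        · simp [List.mem_cons, hjx]
    · rw [if_neg hcx, ih (d.insert x i)]
      by_cases hjx : j = x
      · subst hjx
        have hc' : (d.insert j i).contains j = true := by
          rw [PySem.Dict.contains_insert]; simp
        rw [if_pos hc', PySem.Dict.get?_insert]
        simp [hcx]
      · have hc' : (d.insert x i).contains j = d.contains j := by
          rw [PySem.Dict.contains_insert]; simp [show (j == x) = false by simpa using hjx]
        rw [hc', PySem.Dict.get?_insert, if_neg hjx]
        by_cases hcj : d.contains j = true
        · simp [hcj]
        · simp [hcj, List.mem_cons, hjx]

-- Pass 1, whole fold: the dict maps j to (start index k) + (index of the first group containing j).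
theorem pv_firstMap_get (gs : List (List String)) (k : Int) (d : PySem.Dict String Int) (j : String) :
    ((PySem.List.enumerate gs k).foldl
        (fun d p => p.2.foldl (fun d j' => if d.contains j' then d else d.insert j' p.1) d)
        d).get? j
      = (d.get? j).or ((gs.findIdx? (fun g => g.contains j)).map (fun m => k + (m : Int))) := by
  induction gs generalizing k d with
  | nil => simp [PySem.List.enumerate_nil]
  | cons g gs ih =>
    rw [PySem.List.enumerate_cons, List.foldl_cons, ih]
    rw [pv_dinner g k d j]
    by_cases hcj : d.contains j = true
    · rw [if_pos hcj]
      obtain ⟨v, hv⟩ : ∃ v, d.get? j = some v := by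
        cases h : d.get? j with
        | none => exact absurd ((PySem.Dict.get?_eq_none_iff_contains d j).mp h) (by simp [hcj])
        | some v => exact ⟨v, rfl⟩
      simp [hv]
    · have hdn : d.get? j = none :=
        (PySem.Dict.get?_eq_none_iff_contains d j).mpr (by simpa using hcj)
      rw [if_neg hcj, hdn]
      by_cases hjg : j ∈ g
      · have hpg : g.contains j = true := List.contains_iff_mem.mpr hjg
        rw [if_pos hjg, List.findIdx?_cons, if_pos hpg]
        simp
      · have hpg : g.contains j = false := by
          by_contra h
          exact hjg (List.contains_iff_mem.mp (by simpa using h))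
        rw [if_neg hjg, List.findIdx?_cons, if_neg (by simpa using hjg)]
        cases h : gs.findIdx? (fun g => g.contains j) with
        | none => simp
        | some m =>
          simp
          omega

-- B's per-element test, characterised: for j in group number pre.length, first[j] equals that
-- index iff j occurs in no earlier group.
theorem pv_first_eq_iff (pre gs : List (List String)) (g : List String) (j : String)
    (hjg : j ∈ g) :
    ((firstMap (pre ++ g :: gs)).get? j == some (pre.length : Int)) = true ↔
      ∀ g' ∈ pre, j ∉ g' := by
  unfold firstMap
  rw [pv_firstMap_get, PySem.Dict.get?_empty, Option.none_or, List.findIdx?_append]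
  have hpg : g.contains j = true := List.contains_iff_mem.mpr hjg
  have hcons : (g :: gs).findIdx? (fun g' => g'.contains j) = some 0 := by
    rw [List.findIdx?_cons, if_pos hpg]
  rw [hcons]
  cases h : pre.findIdx? (fun g' => g'.contains j) with
  | none =>
    simp only [Option.none_or, Option.map_some]
    constructor
    · intro _ g' hg' hjg'
      have hfalse := (List.findIdx?_eq_none_iff.mp h) g' hg'
      exact (by simpa using hfalse : j ∉ g') hjg'
    · intro _
      simp
  | some m =>
    have hm : m < pre.length := (List.findIdx?_eq_some_iff_findIdx_eq.mp h).1
    constructor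
    · intro hEq
      exfalso
      simp at hEq
      omega
    · intro hall
      exfalso
      have hnone : pre.findIdx? (fun g' => g'.contains j) = none :=
        List.findIdx?_eq_none_iff.mpr (fun g' hg' => by
          have : j ∉ g' := hall g' hg'
          by_contra hc
          exact this (List.contains_iff_mem.mp (by simpa using hc)))
      rw [h] at hnone
      cases hnone

-- Main loop correspondence: A's running-set loop over the remaining groups equals B's
-- counting loop, given s = the set of elements of the processed prefix 'pre'.
theorem pv_main (gs : List (List String)) : ∀ (pre : List (List String)) (r : Int)
    (s : PySem.Set String), 0 < pre.length →
    (∀ j, j ∈ s ↔ ∃ g' ∈ pre, j ∈ g') →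
    aLoop s r gs
    = (PySem.List.enumerate gs (pre.length : Int)).foldl
        (fun r p =>
          if 0 < p.1 ∧ PySem.Set.len (PySem.Set.ofList p.2) = (p.2.length : Int) ∧
              p.2.all (fun j => (firstMap (pre ++ gs)).get? j == some p.1) = true
          then r + 1 else r) r := by
  induction gs with
  | nil => intro pre r s _ _; rw [PySem.List.enumerate_nil]; rfl
  | cons g gs ih =>
    intro pre r s hpre hs
    rw [PySem.List.enumerate_cons, List.foldl_cons]
    simp only [aLoop]
    have hcond : ((PySem.Set.update s g).length = s.length + g.length) ↔
        (0 < (pre.length : Int) ∧ PySem.Set.len (PySem.Set.ofList g) = (g.length : Int) ∧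
          g.all (fun j => (firstMap (pre ++ g :: gs)).get? j == some (pre.length : Int)) = true) := by
      rw [pv_fresh_iff, pv_ofList_len_iff, List.all_eq_true]
      constructor
      · rintro ⟨hnd, hall⟩
        refine ⟨by exact_mod_cast hpre, hnd, fun j hj => ?_⟩
        rw [pv_first_eq_iff pre gs g j hj]
        intro g' hg' hjg'
        exact hall j hj ((hs j).mpr ⟨g', hg', hjg'⟩)
      · rintro ⟨-, hnd, hall⟩
        refine ⟨hnd, fun j hj hjs => ?_⟩
        obtain ⟨g', hg', hjg'⟩ := (hs j).mp hjs
        exact (pv_first_eq_iff pre gs g j hj).mp (hall j hj) g' hg' hjg'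
    have hinv : ∀ j, j ∈ PySem.Set.update s g ↔ ∃ g' ∈ pre ++ [g], j ∈ g' := by
      intro j
      rw [PySem.Set.mem_update]
      constructor
      · rintro (hjs | hjg)
        · obtain ⟨g', hg', h⟩ := (hs j).mp hjs
          exact ⟨g', by simp [hg'], h⟩
        · exact ⟨g, by simp, hjg⟩
      · rintro ⟨g', hg', h⟩
        rcases (List.mem_append.mp hg') with hg' | hg'
        · exact Or.inl ((hs j).mpr ⟨g', hg', h⟩)
        · simp only [List.mem_singleton] at hg'; subst hg'; exact Or.inr h
    have hrec := fun r' => ih (pre ++ [g]) r' (PySem.Set.update s g) (by simp) hinv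
    by_cases hfresh : (PySem.Set.update s g).length = s.length + g.length
    · rw [if_pos hfresh, if_pos (hcond.mp hfresh)]
      simpa [List.append_assoc] using hrec (r + 1)
    · rw [if_neg hfresh, if_neg (fun h => hfresh (hcond.mpr h))]
      simpa [List.append_assoc] using hrec r

-- ===== VERDICT (by name: the statement is the Claim_ definition above) =====
theorem solve_spec : Claim_equal_solve := by
  intro contacts _
  unfold Spec_solve
  match contacts with
  | [] => rfl
  | c0 :: rest =>
    show solve (c0 :: rest) = solve_alt (c0 :: rest)
    unfold solve solve_alt
    simp only
    rw [PySem.List.enumerate_cons, List.foldl_cons, pv_aLoop]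
    rw [if_neg (by simp)]
    have := pv_main rest [c0] 1 (PySem.Set.ofList c0) (by simp)
      (by intro j; rw [PySem.Set.mem_ofList]; simp)
    simpa using this
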